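-- pv_equiv track=rewrite | github.com/VamsiImmanneni/finalProjectSWEGPT | problems/attentionalBlinks.py | column_sum_with_exclusion
-- ===== SOURCE A (Python) =====
-- def column_sum_with_exclusion(A, B):
--     """Column-wise sum excluding first column of B."""
--     n = len(A)
--     result = []
--     for j in range(1, n):
--         sum_col = 0
--         for i in range(n):
--             sum_col += A[i][j] + B[i][j]
--         result.append(sum_col)
--     return result
-- ===== SOURCE B (Python) =====
-- def column_sum_with_exclusion(A, B):
--     """Column-wise sum excluding first column of B."""
--     n = len(A)
--     rows = [[A[i][j] + B[i][j] for j in range(1, n)] for i in range(n)]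
--     return [sum(col) for col in zip(*rows)]
-- ===== Notes on version B (the rewrite author's own statement) =====
-- stated objective: idiomatic
-- what changed: B materialises the excluded-column elementwise-sum matrix in one comprehension, transposes it with zip(*rows) and sums each tuple, replacing A's nested index loops that compute each column sum as a running scalar.
import Mathlib
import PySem

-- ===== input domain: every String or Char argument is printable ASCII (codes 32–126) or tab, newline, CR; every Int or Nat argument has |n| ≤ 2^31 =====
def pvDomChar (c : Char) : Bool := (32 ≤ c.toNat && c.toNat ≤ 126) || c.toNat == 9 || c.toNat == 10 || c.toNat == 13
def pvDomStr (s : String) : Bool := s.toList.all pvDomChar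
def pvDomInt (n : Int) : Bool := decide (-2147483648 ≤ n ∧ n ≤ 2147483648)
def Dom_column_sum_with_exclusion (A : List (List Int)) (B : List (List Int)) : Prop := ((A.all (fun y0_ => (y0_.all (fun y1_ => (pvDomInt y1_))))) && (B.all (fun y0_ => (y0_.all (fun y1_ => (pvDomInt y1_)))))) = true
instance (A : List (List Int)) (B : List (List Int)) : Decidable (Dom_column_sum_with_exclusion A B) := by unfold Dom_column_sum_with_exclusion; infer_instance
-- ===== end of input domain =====

-- B builds the elementwise-sum matrix (columns 1..n-1), transposes it with zip(*rows) and sums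
-- each column tuple, instead of A's nested index loops accumulating each column sum as a scalar.

-- ===== PORT A =====
def column_sum_with_exclusion (A : List (List Int)) (B : List (List Int)) : List Int :=
  let n : Int := A.length
  (PySem.List.pyRange 1 n 1).foldl (fun result j =>
    result ++ [(PySem.List.pyRange 0 n 1).foldl (fun sum_col i =>
      sum_col + (PySem.List.pyGetD (PySem.List.pyGetD A i []) j 0
               + PySem.List.pyGetD (PySem.List.pyGetD B i []) j 0)) 0]) []

-- ===== PORT B =====
-- minimum row length: how many tuples Python's zip(*rows) yields
def pyMinLen : List (List Int) → Nat
  | [] => 0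
  | [r] => r.length
  | r :: rs => min r.length (pyMinLen rs)

-- semantics of zip(*rows): the first pyMinLen columns of rows (getD's default is never reached)
def pyZipStar (rows : List (List Int)) : List (List Int) :=
  (List.range (pyMinLen rows)).map (fun k => rows.map (fun l => l.getD k 0))

def column_sum_with_exclusion_alt (A : List (List Int)) (B : List (List Int)) : List Int :=
  let n : Int := A.length
  let rows : List (List Int) := (List.range A.length).map (fun (i : Nat) =>
    (PySem.List.pyRange 1 n 1).map (fun j =>
      PySem.List.pyGetD (PySem.List.pyGetD A ((i : Nat) : Int) []) j 0
    + PySem.List.pyGetD (PySem.List.pyGetD B ((i : Nat) : Int) []) j 0))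
  (pyZipStar rows).map List.sum

-- ===== PRECONDITION & SPEC =====
-- Pre_ excludes exactly the inputs on which the Python A raises IndexError (and B raises there too):
-- with n = len(A) ≥ 2, a row among A's rows or B's first n rows shorter than n, or B having fewer than n rows.
def Pre_column_sum_with_exclusion (A : List (List Int)) (B : List (List Int)) : Prop :=
  A.length ≤ 1 ∨ (A.length ≤ B.length ∧ (∀ r ∈ A, A.length ≤ r.length) ∧
                  (∀ r ∈ B.take A.length, A.length ≤ r.length))
instance (A : List (List Int)) (B : List (List Int)) : Decidable (Pre_column_sum_with_exclusion A B) := by unfold Pre_column_sum_with_exclusion; infer_instance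

def pvWitness_column_sum_with_exclusion : List (List Int) × List (List Int) :=
  ([[1, 2], [3, 4]], [[5, 6], [7, 8]])

def Spec_column_sum_with_exclusion (A : List (List Int)) (B : List (List Int)) (out : List Int) : Prop := out = column_sum_with_exclusion_alt A B
instance (A : List (List Int)) (B : List (List Int)) (out : List Int) : Decidable (Spec_column_sum_with_exclusion A B out) := by unfold Spec_column_sum_with_exclusion; infer_instance

-- ===== CLAIM =====
def Claim_equal_column_sum_with_exclusion : Prop := ∀ (A : List (List Int)) (B : List (List Int)), Dom_column_sum_with_exclusion A B → Pre_column_sum_with_exclusion A B → Spec_column_sum_with_exclusion A B (column_sum_with_exclusion A B)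

-- ===== LEMMAS AND PROOFS =====

-- the common closed form: column j summed over all rows counted by A
def pvCol (A B : List (List Int)) (j : Nat) : Int :=
  ((List.range A.length).map (fun i => (A.getD i []).getD j 0 + (B.getD i []).getD j 0)).sum

theorem portA_eq (A B : List (List Int)) :
    column_sum_with_exclusion A B =
      (List.range (A.length - 1)).map (fun k => pvCol A B (1 + k)) := by
  unfold column_sum_with_exclusion
  rw [PySem.List.foldl_append_singleton_eq_map, List.nil_append, PySem.List.pyRange_zero_nat,
    PySem.List.pyRange_one]
  have h1 : (((A.length : Int)) - 1).toNat = A.length - 1 := by omega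
  rw [h1, List.map_map]
  apply List.map_congr_left
  intro k _
  simp only [Function.comp_apply]
  rw [PySem.List.foldl_add, List.map_map, zero_add]
  unfold pvCol
  apply congrArg
  apply List.map_congr_left
  intro i _
  simp only [Function.comp_apply]
  have hc : (1 : Int) + (k : Int) = ((1 + k : Nat) : Int) := by push_cast; ring
  rw [hc]
  simp only [PySem.List.pyGetD_natCast]

theorem pyMinLen_const (rows : List (List Int)) (m : Nat)
    (h : ∀ r ∈ rows, r.length = m) (hne : rows ≠ []) : pyMinLen rows = m := by
  induction rows with
  | nil => exact absurd rfl hne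
  | cons r rs ih =>
    cases rs with
    | nil => exact h r List.mem_cons_self
    | cons r2 rs2 =>
      show min r.length (pyMinLen (r2 :: rs2)) = m
      rw [h r List.mem_cons_self,
        ih (fun q hq => h q (List.mem_cons_of_mem _ hq)) (by simp)]
      exact Nat.min_self m

theorem portB_eq (A B : List (List Int)) :
    column_sum_with_exclusion_alt A B =
      (List.range (A.length - 1)).map (fun k => pvCol A B (1 + k)) := by
  unfold column_sum_with_exclusion_alt
  have hglen : ∀ i : Nat,
      ((PySem.List.pyRange 1 (A.length : Int) 1).map (fun j =>
        PySem.List.pyGetD (PySem.List.pyGetD A ((i : Nat) : Int) []) j 0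
      + PySem.List.pyGetD (PySem.List.pyGetD B ((i : Nat) : Int) []) j 0)).length
        = A.length - 1 := by
    intro i
    simp only [List.length_map, PySem.List.length_pyRange_one]
    omega
  by_cases h0 : A.length = 0
  · simp [pyZipStar, pyMinLen, h0]
  · have hml : pyMinLen ((List.range A.length).map (fun (i : Nat) =>
        (PySem.List.pyRange 1 (A.length : Int) 1).map (fun j =>
          PySem.List.pyGetD (PySem.List.pyGetD A ((i : Nat) : Int) []) j 0
        + PySem.List.pyGetD (PySem.List.pyGetD B ((i : Nat) : Int) []) j 0)))
        = A.length - 1 := by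
      apply pyMinLen_const _ (A.length - 1)
      · intro r hr
        obtain ⟨i, _, rfl⟩ := List.mem_map.mp hr
        exact hglen i
      · simp only [ne_eq, List.map_eq_nil_iff, List.range_eq_nil]
        exact h0
    show List.map List.sum
      (List.map (fun k => List.map (fun l => l.getD k 0)
          ((List.range A.length).map (fun (i : Nat) =>
            (PySem.List.pyRange 1 (A.length : Int) 1).map (fun j =>
              PySem.List.pyGetD (PySem.List.pyGetD A ((i : Nat) : Int) []) j 0
            + PySem.List.pyGetD (PySem.List.pyGetD B ((i : Nat) : Int) []) j 0))))
        (List.range (pyMinLen ((List.range A.length).map (fun (i : Nat) =>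
            (PySem.List.pyRange 1 (A.length : Int) 1).map (fun j =>
              PySem.List.pyGetD (PySem.List.pyGetD A ((i : Nat) : Int) []) j 0
            + PySem.List.pyGetD (PySem.List.pyGetD B ((i : Nat) : Int) []) j 0))))))
      = List.map (fun k => pvCol A B (1 + k)) (List.range (A.length - 1))
    rw [hml, List.map_map]
    apply List.map_congr_left
    intro k hk
    have hkm : k < A.length - 1 := List.mem_range.mp hk
    simp only [Function.comp_apply]
    unfold pvCol
    rw [List.map_map]
    apply congrArg
    apply List.map_congr_left
    intro i hi
    have hin : i < A.length := List.mem_range.mp hi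
    simp only [Function.comp_apply]
    have hklt : k < ((PySem.List.pyRange 1 (A.length : Int) 1).map (fun j =>
        PySem.List.pyGetD (PySem.List.pyGetD A ((i : Nat) : Int) []) j 0
      + PySem.List.pyGetD (PySem.List.pyGetD B ((i : Nat) : Int) []) j 0)).length := by
      rw [hglen]; omega
    rw [List.getD_eq_getElem _ 0 hklt]
    simp only [List.getElem_map, PySem.List.getElem_pyRange_one]
    have hc : (1 : Int) + (k : Int) = ((1 + k : Nat) : Int) := by push_cast; ring
    rw [hc]
    simp only [PySem.List.pyGetD_natCast]

-- ===== VERDICT =====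
theorem column_sum_with_exclusion_spec : Claim_equal_column_sum_with_exclusion := by
  intro A B _ _
  unfold Spec_column_sum_with_exclusion
  rw [portA_eq, portB_eq]
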